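-- pv_equiv track=rewrite | github.com/akuazuk/cursor_instagram | ig_apify_scrape.py | _pick_baseline_from_rows
-- ===== SOURCE A (Python) =====
-- from typing import Any, Iterable, Optional
--
-- def _pick_baseline_from_rows(rows: list[tuple[Any, ...]], baseline: str) -> str:
--     """
--     Pick baseline label from raw DB rows when benchmark rows are not available.
--     rows tuples start with profile_label, profile_url.
--     """
--     b = (baseline or "").strip().lower()
--     if not rows:
--         return baseline
--     labels = []
--     urls = []
--     for r in rows:
--         labels.append(str(r[0] or ""))
--         urls.append(str(r[1] or ""))
--     # exact label match
--     for lab in labels: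
--         if lab.lower() == b:
--             return lab
--     # match by URL substring
--     for lab, u in zip(labels, urls):
--         if b and b in (u or "").lower():
--             return lab
--     # substring label match
--     for lab in labels:
--         if b and b in lab.lower():
--             return lab
--     # default: first label
--     return labels[0] or baseline
-- ===== SOURCE B (Python) =====
-- def _pick_baseline_from_rows(rows, baseline):
--     """Single pass over rows instead of building label/url lists and scanning three times."""
--     b = (baseline or "").strip().lower()
--     if not rows:
--         return baseline
--     url_hit = None
--     lab_hit = None
--     first_lab = None
--     for r in rows:
--         lab = str(r[0] or "")
--         u = str(r[1] or "")
--         if lab.lower() == b: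
--             return lab
--         if first_lab is None:
--             first_lab = lab
--         if b:
--             if url_hit is None and b in u.lower():
--                 url_hit = lab
--             if lab_hit is None and b in lab.lower():
--                 lab_hit = lab
--     if url_hit is not None:
--         return url_hit
--     if lab_hit is not None:
--         return lab_hit
--     return first_lab or baseline
-- ===== Notes on version B (the rewrite author's own statement) =====
-- stated objective: simpler
-- what changed: Replaces A's list-building pass plus three separate scan passes (exact label, URL substring, label substring) by a single pass that returns immediately on an exact match and records the first URL-substring and label-substring hits in accumulators.
import Mathlib
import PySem

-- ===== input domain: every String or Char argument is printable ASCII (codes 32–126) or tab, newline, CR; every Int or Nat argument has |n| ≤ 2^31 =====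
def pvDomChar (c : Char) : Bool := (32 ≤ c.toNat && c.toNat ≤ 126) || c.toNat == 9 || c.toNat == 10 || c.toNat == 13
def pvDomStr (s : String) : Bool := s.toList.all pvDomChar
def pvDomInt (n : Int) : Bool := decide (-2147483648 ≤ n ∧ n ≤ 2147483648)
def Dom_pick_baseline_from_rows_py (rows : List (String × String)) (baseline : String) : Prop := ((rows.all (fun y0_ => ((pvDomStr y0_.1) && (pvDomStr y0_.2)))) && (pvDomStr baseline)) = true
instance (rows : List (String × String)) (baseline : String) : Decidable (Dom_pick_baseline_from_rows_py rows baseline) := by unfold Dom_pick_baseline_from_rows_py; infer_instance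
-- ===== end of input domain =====

-- B replaces A's list-building pass plus three scan passes by one pass that
-- returns on the first exact match and records the first URL/label-substring hits (objective: simpler, one pass).

-- ===== PORT A =====
def pick_baseline_from_rows_py (rows : List (String × String)) (baseline : String) : String :=
  let b := PySem.Str.lower (PySem.Str.strip (if baseline = "" then "" else baseline))
  if rows = [] then baseline
  else
    let labels := rows.map (fun r => if r.1 = "" then "" else r.1)   -- str(r[0] or "")
    let urls := rows.map (fun r => if r.2 = "" then "" else r.2)     -- str(r[1] or "")
    match labels.find? (fun lab => PySem.Str.lower lab == b) with
    | some lab => lab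
    | none =>
      match (labels.zip urls).find?
          (fun p => decide (b ≠ "") && PySem.Str.isIn b (PySem.Str.lower (if p.2 = "" then "" else p.2))) with
      | some p => p.1
      | none =>
        match labels.find? (fun lab => decide (b ≠ "") && PySem.Str.isIn b (PySem.Str.lower lab)) with
        | some lab => lab
        | none =>
          let first := labels.headD ""   -- labels[0]; rows ≠ [] so labels ≠ []
          if first = "" then baseline else first

-- ===== PORT B =====
def pickGoB (b baseline : String) : List (String × String) → Option String → Option String → Option String → String
  | [], uHit, lHit, fLab =>
    match uHit with
    | some x => x
    | none =>
      match lHit with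
      | some x => x
      | none =>
        match fLab with
        | some f => if f = "" then baseline else f
        | none => baseline
  | (lab0, u0) :: rest, uHit, lHit, fLab =>
    let lab := if lab0 = "" then "" else lab0
    let u := if u0 = "" then "" else u0
    if PySem.Str.lower lab == b then lab
    else
      let fLab' := if fLab.isNone then some lab else fLab
      let uHit' := if uHit.isNone && (decide (b ≠ "") && PySem.Str.isIn b (PySem.Str.lower u)) then some lab else uHit
      let lHit' := if lHit.isNone && (decide (b ≠ "") && PySem.Str.isIn b (PySem.Str.lower lab)) then some lab else lHit
      pickGoB b baseline rest uHit' lHit' fLab'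

def pick_baseline_from_rows_py_alt (rows : List (String × String)) (baseline : String) : String :=
  let b := PySem.Str.lower (PySem.Str.strip (if baseline = "" then "" else baseline))
  if rows = [] then baseline
  else pickGoB b baseline rows none none none

-- ===== PRECONDITION & SPEC =====
def Spec_pick_baseline_from_rows_py (rows : List (String × String)) (baseline : String) (out : String) : Prop := out = pick_baseline_from_rows_py_alt rows baseline
instance (rows : List (String × String)) (baseline : String) (out : String) : Decidable (Spec_pick_baseline_from_rows_py rows baseline out) := by unfold Spec_pick_baseline_from_rows_py; infer_instance

-- ===== CLAIM (what is proved, stated in full; the proofs are below) =====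
def Claim_equal_pick_baseline_from_rows_py : Prop := ∀ (rows : List (String × String)) (baseline : String), Dom_pick_baseline_from_rows_py rows baseline → Spec_pick_baseline_from_rows_py rows baseline (pick_baseline_from_rows_py rows baseline)

-- ===== LEMMAS AND PROOFS =====

-- `str(x or "")` on a string is the string itself
theorem pv_orEmpty (s : String) : (if s = "" then "" else s) = s := by
  by_cases h : s = "" <;> simp [h]

-- characterisation of the one-pass loop in terms of the three scans
theorem pickGoB_spec (b baseline : String) (rows : List (String × String))
    (uHit lHit fLab : Option String) :
    pickGoB b baseline rows uHit lHit fLab =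
      match rows.find? (fun r => PySem.Str.lower r.1 == b) with
      | some r => r.1
      | none =>
        match uHit.or ((rows.find? (fun r => decide (b ≠ "") && PySem.Str.isIn b (PySem.Str.lower r.2))).map (·.1)) with
        | some x => x
        | none =>
          match lHit.or ((rows.find? (fun r => decide (b ≠ "") && PySem.Str.isIn b (PySem.Str.lower r.1))).map (·.1)) with
          | some x => x
          | none =>
            match fLab.or (rows.head?.map (·.1)) with
            | some f => if f = "" then baseline else f
            | none => baseline := by
  induction rows generalizing uHit lHit fLab with
  | nil => cases uHit <;> cases lHit <;> cases fLab <;> simp [pickGoB]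
  | cons r rest ih =>
    obtain ⟨lab0, u0⟩ := r
    simp only [pickGoB, pv_orEmpty]
    cases hex : (PySem.Str.lower lab0 == b) with
    | true =>
      simp [hex]
    | false =>
      rw [if_neg (by simp [hex])]
      rw [ih]
      cases hu : (decide (b ≠ "") && PySem.Str.isIn b (PySem.Str.lower u0)) <;>
      cases hl : (decide (b ≠ "") && PySem.Str.isIn b (PySem.Str.lower lab0)) <;>
      cases uHit <;> cases lHit <;> cases fLab <;>
        simp only [List.find?_cons, hex, hu, hl, Option.isNone_none, Option.isNone_some,
          Bool.and_true, Bool.and_false, if_true, Option.none_or, Option.or,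
          Option.map_some, Option.map_none, List.head?_cons, Bool.false_eq_true, ite_false]

-- ===== VERDICT (by name: the statement is the Claim_ definition above) =====
set_option maxHeartbeats 1000000 in
theorem pick_baseline_from_rows_py_spec : Claim_equal_pick_baseline_from_rows_py := by
  intro rows baseline _
  unfold Spec_pick_baseline_from_rows_py pick_baseline_from_rows_py pick_baseline_from_rows_py_alt
  cases rows with
  | nil => simp
  | cons r rest =>
    have hne : ¬ (r :: rest = ([] : List (String × String))) := by simp
    simp only [pv_orEmpty, if_neg hne]
    generalize PySem.Str.lower (PySem.Str.strip baseline) = b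
    rw [pickGoB_spec]
    rw [List.zip_map', List.find?_map, List.find?_map, List.find?_map]
    simp only [Function.comp_def, Option.map_id', Option.none_or, Option.map_some, Option.map_none,
      List.head?_cons, List.headD, List.map_cons, Prod.mk.eta]
    cases hfe : (r :: rest).find? (fun p => PySem.Str.lower p.1 == b) <;>
    cases hfu : (r :: rest).find? (fun p : String × String => decide (b ≠ "") && PySem.Str.isIn b (PySem.Str.lower p.2)) <;>
    cases hfl : (r :: rest).find? (fun p : String × String => decide (b ≠ "") && PySem.Str.isIn b (PySem.Str.lower p.1)) <;>
      simp only [hfe, hfu, hfl, Option.map_some, Option.map_none]
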